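-- pv_equiv track=rewrite | github.com/boppreh/adventofcode | 11.py | increment
-- ===== SOURCE A (Python) =====
-- def increment(password):
--     assert 0 < len(password) <= 8
--
--     if len(password) == 1:
--         return chr(ord(password) + 1)
--
--     for letter in 'iol':
--         if letter in password:
--             first, second = password.rsplit(letter, 1)
--             return increment(first + increment(letter) + 'a' * len(second))
--
--     if password.endswith('z'):
--         return increment(password[:-1]) + 'a'
--     return password[:-1] + increment(password[-1])
--
-- password = 'hepxcrrq'
-- ===== SOURCE B (Python) =====
-- def increment(password):
--     assert 0 < len(password) <= 8
--     if len(password) == 1: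
--         return chr(ord(password) + 1)
--     chars = list(password)
--     # skip phase: bump the first forbidden letter, wipe everything after it
--     for i, c in enumerate(chars):
--         if c in 'iol':
--             chars[i] = chr(ord(c) + 1)
--             for j in range(i + 1, len(chars)):
--                 chars[j] = 'a'
--             break
--     # carry phase: increment from the rightmost position
--     k = len(chars) - 1
--     while k >= 0 and chars[k] == 'z':
--         chars[k] = 'a'
--         k -= 1
--     if k < 0:
--         chars[0] = '{'
--     else:
--         chars[k] = chr(ord(chars[k]) + 1)
--     return ''.join(chars)
-- ===== Notes on version B (the rewrite author's own statement) =====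
-- stated objective: alternative
-- what changed: Replaces A's multi-level string recursion (repeated rsplit/concat passes, one per forbidden letter occurrence and per trailing 'z') with a single iterative two-phase pass over a char list: bump the first 'iol' letter and wipe the tail, then one right-to-left carry.
import Mathlib
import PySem

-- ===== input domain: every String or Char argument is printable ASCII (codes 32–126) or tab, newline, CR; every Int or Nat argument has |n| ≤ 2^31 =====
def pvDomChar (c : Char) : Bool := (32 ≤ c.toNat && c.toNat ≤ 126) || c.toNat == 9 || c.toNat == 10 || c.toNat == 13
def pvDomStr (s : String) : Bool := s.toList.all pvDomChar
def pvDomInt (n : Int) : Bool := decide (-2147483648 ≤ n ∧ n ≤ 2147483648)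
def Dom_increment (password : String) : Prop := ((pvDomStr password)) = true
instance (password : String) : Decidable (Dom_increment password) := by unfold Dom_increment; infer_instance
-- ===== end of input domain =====

-- B replaces A's multi-level string recursion by one iterative two-phase pass
-- (bump the first 'iol' letter and wipe the tail, then a right-to-left carry);
-- equivalence is proved on 1 ≤ len ≤ 8 (outside, Python A raises AssertionError).

-- ===== PORT A =====
-- chr(ord(c) + 1); exact for the chars reached here
def pvBump (c : Char) : Char := Char.ofNat (c.toNat + 1)

-- hand port of password.rsplit(letter, 1): split around the LAST occurrence
-- (none if the letter is absent, matching `letter in password` = isSome); exact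
def pvLastSplit (c : Char) : List Char → Option (List Char × List Char)
  | [] => none
  | x :: xs =>
    match pvLastSplit c xs with
    | some (f, s) => some (x :: f, s)
    | none => if x = c then some ([], xs) else none

-- A's recursion, step for step, over the char list; the fuel only makes the same
-- computation total (100 is proved sufficient on 1 ≤ len ≤ 8 below); the `[]` in the
-- guard-failure branch stands for Python's AssertionError (excluded by Pre_).
def incrementF : Nat → List Char → List Char
  | 0, _ => []
  | fuel + 1, l =>
    if 0 < l.length ∧ l.length ≤ 8 then
      if l.length = 1 then [pvBump (l.headD 'a')]
      else
        match pvLastSplit 'i' l with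
        | some (f, s) => incrementF fuel (f ++ incrementF fuel ['i'] ++ List.replicate s.length 'a')
        | none =>
          match pvLastSplit 'o' l with
          | some (f, s) => incrementF fuel (f ++ incrementF fuel ['o'] ++ List.replicate s.length 'a')
          | none =>
            match pvLastSplit 'l' l with
            | some (f, s) => incrementF fuel (f ++ incrementF fuel ['l'] ++ List.replicate s.length 'a')
            | none =>
              if l.getLastD 'a' = 'z' then incrementF fuel l.dropLast ++ ['a']
              else l.dropLast ++ incrementF fuel [l.getLastD 'a']
    else []

def increment (password : String) : String := String.ofList (incrementF 100 password.toList)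

-- ===== PORT B =====
-- B's skip loop: find the first char in 'iol', bump it, overwrite the rest with 'a'
def pvBumpFill : List Char → List Char
  | [] => []
  | c :: rest =>
    if c == 'i' || c == 'o' || c == 'l' then pvBump c :: List.replicate rest.length 'a'
    else c :: pvBumpFill rest

-- B's carry while-loop, walking the reversed list; none = fell off the left end (all 'z')
def pvCarryRev : List Char → Option (List Char)
  | [] => none
  | c :: rest =>
    if c = 'z' then (pvCarryRev rest).map (fun r => 'a' :: r)
    else some (pvBump c :: rest)

def pvCarry (l : List Char) : List Char :=
  match pvCarryRev l.reverse with
  | some r => r.reverse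
  | none => '{' :: List.replicate (l.length - 1) 'a'

def increment_alt (password : String) : String :=
  let l := password.toList
  if 0 < l.length ∧ l.length ≤ 8 then
    if l.length = 1 then String.ofList [pvBump (l.headD 'a')]
    else String.ofList (pvCarry (pvBumpFill l))
  else ""

-- ===== PRECONDITION & SPEC =====
-- Python A asserts 0 < len(password) <= 8 and raises AssertionError otherwise;
-- Pre_ excludes exactly those raising inputs.
def Pre_increment (password : String) : Prop :=
  0 < password.toList.length ∧ password.toList.length ≤ 8

instance (password : String) : Decidable (Pre_increment password) := by
  unfold Pre_increment; infer_instance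

def pvWitness_increment : String := "hepxcrrq"

def Spec_increment (password : String) (out : String) : Prop := out = increment_alt password
instance (password : String) (out : String) : Decidable (Spec_increment password out) := by unfold Spec_increment; infer_instance

-- ===== CLAIM (what is proved, stated in full; the proofs are below) =====
def Claim_equal_increment : Prop := ∀ (password : String), Dom_increment password → Pre_increment password → Spec_increment password (increment password)

-- ===== LEMMAS AND PROOFS =====

-- measure driving A's recursion: 9 * (#occurrences of i/o/l) + length
def pvMu (l : List Char) : Nat :=
  9 * l.countP (fun c => c == 'i' || c == 'o' || c == 'l') + l.length

theorem pvLastSplit_eq {c : Char} : ∀ {l f s : List Char},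
    pvLastSplit c l = some (f, s) → l = f ++ c :: s := by
  intro l
  induction l with
  | nil => intro f s h; simp [pvLastSplit] at h
  | cons x xs ih =>
    intro f s h
    simp only [pvLastSplit] at h
    cases hx : pvLastSplit c xs with
    | some p =>
      obtain ⟨f', s'⟩ := p
      simp only [hx, Option.some.injEq, Prod.mk.injEq] at h
      obtain ⟨hf, hs⟩ := h
      subst hf; subst hs
      simpa using congrArg (x :: ·) (ih hx)
    | none =>
      simp only [hx] at h
      split at h
      · rename_i hxc
        simp only [Option.some.injEq, Prod.mk.injEq] at h
        obtain ⟨hf, hs⟩ := h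
        subst hf; subst hs; subst hxc; rfl
      · simp at h

theorem pvLastSplit_none {c : Char} : ∀ {l : List Char},
    pvLastSplit c l = none → c ∉ l := by
  intro l
  induction l with
  | nil => intro _; simp
  | cons x xs ih =>
    intro h
    simp only [pvLastSplit] at h
    cases hx : pvLastSplit c xs with
    | some p => simp only [hx] at h; simp at h
    | none =>
      simp only [hx] at h
      split at h
      · simp at h
      · rename_i hxc
        simp only [List.mem_cons, not_or]
        exact ⟨fun hc => hxc hc.symm, ih hx⟩

theorem bumpFill_noIol : ∀ {l : List Char},
    (∀ x ∈ l, (x == 'i' || x == 'o' || x == 'l') = false) → pvBumpFill l = l := by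
  intro l
  induction l with
  | nil => intro _; rfl
  | cons x xs ih =>
    intro h
    simp only [pvBumpFill, h x (List.mem_cons_self), Bool.false_eq_true, if_false]
    rw [ih (fun y hy => h y (List.mem_cons_of_mem x hy))]

theorem bumpFill_step {c : Char} (hc : (c == 'i' || c == 'o' || c == 'l') = true)
    (hb : (pvBump c == 'i' || pvBump c == 'o' || pvBump c == 'l') = false) :
    ∀ (f s : List Char),
      pvBumpFill (f ++ pvBump c :: List.replicate s.length 'a') = pvBumpFill (f ++ c :: s) := by
  intro f s
  induction f with
  | nil =>
    simp only [List.nil_append, pvBumpFill, hc, hb, Bool.false_eq_true, if_false, if_true]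
    rw [bumpFill_noIol (by intro x hx; rw [List.eq_of_mem_replicate hx]; rfl)]
  | cons x xs ih =>
    by_cases hx : (x == 'i' || x == 'o' || x == 'l') = true
    · simp only [List.cons_append, pvBumpFill, hx, if_true]
      simp
    · simp only [List.cons_append, pvBumpFill, hx, Bool.false_eq_true, if_false]
      rw [ih]

theorem carry_singleton (c : Char) : pvCarry [c] = [pvBump c] := by
  by_cases h : c = 'z'
  · subst h; decide
  · simp [pvCarry, pvCarryRev, h]

theorem carry_last_z {l : List Char} (h : l ≠ []) :
    pvCarry (l ++ ['z']) = pvCarry l ++ ['a'] := by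
  simp only [pvCarry, List.reverse_append, List.reverse_cons, List.reverse_nil,
    List.nil_append, List.cons_append, pvCarryRev]
  cases hr : pvCarryRev l.reverse with
  | some r => simp
  | none =>
    simp only [Option.map_none]
    have hl : 1 ≤ l.length := Nat.one_le_iff_ne_zero.mpr (fun h0 => h (List.eq_nil_of_length_eq_zero h0))
    simp only [List.length_append, List.length_cons, List.length_nil]
    rw [show l.length + 1 - 1 = (l.length - 1) + 1 by omega, List.replicate_succ']
    simp

theorem carry_last_ne {c : Char} (h : c ≠ 'z') (l : List Char) :
    pvCarry (l ++ [c]) = l ++ [pvBump c] := by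
  simp [pvCarry, pvCarryRev, h]

theorem countP_replicate_a (n : Nat) :
    (List.replicate n 'a').countP (fun c => c == 'i' || c == 'o' || c == 'l') = 0 := by
  rw [List.countP_eq_zero]
  intro a ha
  rw [List.eq_of_mem_replicate ha]
  decide

theorem noIol_of_splits {l : List Char}
    (hi : pvLastSplit 'i' l = none) (ho : pvLastSplit 'o' l = none)
    (hl : pvLastSplit 'l' l = none) :
    ∀ x ∈ l, (x == 'i' || x == 'o' || x == 'l') = false := by
  intro x hx
  simp only [Bool.or_eq_false_iff, beq_eq_false_iff_ne]
  exact ⟨⟨fun he => pvLastSplit_none hi (he ▸ hx), fun he => pvLastSplit_none ho (he ▸ hx)⟩,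
    fun he => pvLastSplit_none hl (he ▸ hx)⟩

theorem found_case {m : Nat} {l f s : List Char} {c : Char}
    (ih : ∀ l' : List Char, 0 < l'.length → l'.length ≤ 8 → pvMu l' < m →
      incrementF m l' = if l'.length = 1 then [pvBump (l'.headD 'a')] else pvCarry (pvBumpFill l'))
    (hc : (c == 'i' || c == 'o' || c == 'l') = true)
    (hb : (pvBump c == 'i' || pvBump c == 'o' || pvBump c == 'l') = false)
    (hsplit : l = f ++ c :: s)
    (hlen2 : 2 ≤ l.length) (h8 : l.length ≤ 8) (hmu : pvMu l < m + 1) :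
    incrementF m (f ++ incrementF m [c] ++ List.replicate s.length 'a') = pvCarry (pvBumpFill l) := by
  have hcountl : l.countP (fun x => x == 'i' || x == 'o' || x == 'l') =
      f.countP (fun x => x == 'i' || x == 'o' || x == 'l') +
      s.countP (fun x => x == 'i' || x == 'o' || x == 'l') + 1 := by
    subst hsplit
    simp [List.countP_append, hc]
    omega
  have hlenl : l.length = f.length + s.length + 1 := by subst hsplit; simp; omega
  have hmul : 11 ≤ pvMu l := by unfold pvMu; omega
  have hc1 : incrementF m [c] = [pvBump c] := by
    rw [ih [c] (by simp) (by simp) (by unfold pvMu; simp [hc]; omega)]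
    simp
  rw [hc1]
  have harg : f ++ [pvBump c] ++ List.replicate s.length 'a' = f ++ pvBump c :: List.replicate s.length 'a' := by
    simp
  rw [harg]
  have hcarg : (f ++ pvBump c :: List.replicate s.length 'a').countP
      (fun x => x == 'i' || x == 'o' || x == 'l') =
      f.countP (fun x => x == 'i' || x == 'o' || x == 'l') := by
    simp [List.countP_append, hb, countP_replicate_a]
  have hlarg : (f ++ pvBump c :: List.replicate s.length 'a').length = l.length := by
    simp [hlenl]; omega
  rw [ih _ (by omega) (by omega) (by unfold pvMu at hmu ⊢; rw [hcarg, hlarg]; omega)]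
  rw [if_neg (by omega)]
  rw [bumpFill_step hc hb f s, ← hsplit]

theorem incrementF_main : ∀ (fuel : Nat) (l : List Char),
    0 < l.length → l.length ≤ 8 → pvMu l < fuel →
    incrementF fuel l =
      if l.length = 1 then [pvBump (l.headD 'a')] else pvCarry (pvBumpFill l) := by
  intro fuel
  induction fuel with
  | zero => intro l _ _ hmu; exact absurd hmu (Nat.not_lt_zero _)
  | succ m ih =>
    intro l h1 h8 hmu
    rw [incrementF, if_pos ⟨h1, h8⟩]
    by_cases hlen : l.length = 1
    · rw [if_pos hlen, if_pos hlen]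
    · rw [if_neg hlen, if_neg hlen]
      have hlen2 : 2 ≤ l.length := by omega
      cases hi : pvLastSplit 'i' l with
      | some p =>
        obtain ⟨f, s⟩ := p
        simp only
        exact found_case ih (by decide) (by decide) (pvLastSplit_eq hi) hlen2 h8 hmu
      | none =>
        cases ho : pvLastSplit 'o' l with
        | some p =>
          obtain ⟨f, s⟩ := p
          simp only
          exact found_case ih (by decide) (by decide) (pvLastSplit_eq ho) hlen2 h8 hmu
        | none =>
          cases hl : pvLastSplit 'l' l with
          | some p =>
            obtain ⟨f, s⟩ := p
            simp only
            exact found_case ih (by decide) (by decide) (pvLastSplit_eq hl) hlen2 h8 hmu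
          | none =>
            simp only
            have hno := noIol_of_splits hi ho hl
            rw [bumpFill_noIol hno]
            rcases List.eq_nil_or_concat l with rfl | ⟨ys, y, rfl⟩
            · simp at hlen2
            · simp only [List.concat_eq_append] at h1 h8 hmu hlen hlen2 hno ⊢
              have hys1 : 1 ≤ ys.length := by
                simp only [List.length_append, List.length_cons, List.length_nil] at hlen2
                omega
              have hysne : ys ≠ [] := by
                intro h0; rw [h0] at hys1; simp at hys1
              have hgl : (ys ++ [y]).getLastD 'a' = y := by simp
              have hdrop : (ys ++ [y]).dropLast = ys := by simp
              have hmu' : pvMu ys + 1 ≤ pvMu (ys ++ [y]) := by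
                unfold pvMu
                simp only [List.countP_append, List.length_append, List.length_cons,
                  List.length_nil]
                omega
              rw [hgl, hdrop]
              by_cases hz : y = 'z'
              · rw [if_pos hz, hz, carry_last_z hysne]
                have hys : incrementF m ys = pvCarry ys := by
                  rw [ih ys hys1 (by simp only [List.length_append, List.length_cons,
                      List.length_nil] at h8; omega) (by omega)]
                  by_cases h1' : ys.length = 1
                  · obtain ⟨c0, rfl⟩ := List.length_eq_one_iff.mp h1'
                    rw [if_pos h1', carry_singleton]
                    simp
                  · rw [if_neg h1', bumpFill_noIol
                      (fun x hx => hno x (List.mem_append_left _ hx))]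
                rw [hys]
              · rw [if_neg hz, carry_last_ne hz]
                have hy1 : incrementF m [y] = [pvBump y] := by
                  rw [ih [y] (by simp) (by simp)
                    (by
                      have hmuy : pvMu [y] = 9 * List.countP (fun x => x == 'i' || x == 'o' || x == 'l') [y] + 1 := by
                        unfold pvMu; simp
                      have h0 : List.countP (fun x => x == 'i' || x == 'o' || x == 'l') [y] = 0 := by
                        simp [hno y (List.mem_append_right _ (List.mem_singleton_self y))]
                      have h2' : 1 ≤ pvMu ys := by
                        unfold pvMu; omega
                      omega)]
                  simp
                rw [hy1]

-- ===== VERDICT (by name: the statement is the Claim_ definition above) =====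
theorem increment_spec : Claim_equal_increment := by
  intro password _ hpre
  unfold Pre_increment at hpre
  obtain ⟨h1, h8⟩ := hpre
  unfold Spec_increment increment increment_alt
  rw [if_pos ⟨h1, h8⟩]
  have hcnt : password.toList.countP (fun c => c == 'i' || c == 'o' || c == 'l') ≤
      password.toList.length := List.countP_le_length
  have hmu : pvMu password.toList < 100 := by unfold pvMu; omega
  rw [incrementF_main 100 password.toList h1 h8 hmu]
  by_cases hlen : password.toList.length = 1
  · rw [if_pos hlen, if_pos hlen]
  · rw [if_neg hlen, if_neg hlen]
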